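-- pv_equiv track=rewrite | github.com/Arnie016/erdos170 | src/sparse_ruler/stage1.py | unique_support_scores
-- ===== SOURCE A (Python) =====
-- from typing import Dict, Iterable, List, Optional, Sequence, Tuple
--
-- def unique_support_scores(marks: Sequence[int], W: Sequence[int], max_d: int) -> Dict[int, int]:
--     scores = {mark: 0 for mark in marks}
--     for i, ai in enumerate(marks):
--         for j in range(i + 1, len(marks)):
--             aj = marks[j]
--             d = abs(aj - ai)
--             if d <= max_d and W[d] == 1:
--                 scores[ai] += 1
--                 scores[aj] += 1
--     return scores
-- ===== SOURCE B (Python) =====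
-- def unique_support_scores(marks, W, max_d):
--     counts = {}
--     for m in marks:
--         counts[m] = counts.get(m, 0) + 1
--     limit = min(max_d, len(W) - 1)
--     valid = [d for d in range(limit + 1) if W[d] == 1]
--     scores = {}
--     for m, cm in counts.items():
--         support = 0
--         for d in valid:
--             if d == 0:
--                 support += cm - 1
--             else:
--                 support += counts.get(m + d, 0) + counts.get(m - d, 0)
--         scores[m] = cm * support
--     return scores
-- ===== Notes on version B (the rewrite author's own statement) =====
-- stated objective: faster
-- what changed: Replaces the O(n^2) scan over all index pairs by a value Counter plus a precomputed list of valid distances: each distinct mark's support is read off by table lookups c[m+d]/c[m-d] (with c[m]-1 for d=0), then multiplied by its occurrence count.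
import Mathlib
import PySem

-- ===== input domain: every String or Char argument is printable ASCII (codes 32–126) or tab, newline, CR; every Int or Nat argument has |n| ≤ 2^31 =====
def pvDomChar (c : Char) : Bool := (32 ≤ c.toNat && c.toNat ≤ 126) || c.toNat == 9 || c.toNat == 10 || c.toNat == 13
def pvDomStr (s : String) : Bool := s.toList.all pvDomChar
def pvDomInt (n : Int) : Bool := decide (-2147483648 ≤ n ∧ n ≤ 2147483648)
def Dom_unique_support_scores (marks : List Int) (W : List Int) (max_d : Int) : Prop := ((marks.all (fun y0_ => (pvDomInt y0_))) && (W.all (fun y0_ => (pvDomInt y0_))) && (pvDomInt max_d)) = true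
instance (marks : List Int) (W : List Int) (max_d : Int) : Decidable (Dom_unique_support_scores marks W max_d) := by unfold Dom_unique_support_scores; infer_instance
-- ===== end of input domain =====

-- B replaces A's O(n^2) all-pairs scan by a value counter plus a precomputed valid-distance list
-- (table lookups per distinct mark); a timing run decides whether the 'faster' label stands.

-- ===== PORT A =====
-- the test `d <= max_d and W[d] == 1` of A's inner loop (W[d] ported as pyGetD; Pre_ excludes the IndexError inputs)
def pvValid (W : List Int) (max_d d : Int) : Bool :=
  decide (d ≤ max_d ∧ PySem.List.pyGetD W d 0 = 1)

-- body of A's inner loop: `if d <= max_d and W[d] == 1: scores[ai] += 1; scores[aj] += 1`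
def pvStepA (W : List Int) (max_d : Int) (sc : PySem.Dict Int Int) (ai aj : Int) : PySem.Dict Int Int :=
  if pvValid W max_d ((aj - ai).natAbs : Int) then
    (sc.modify ai 0 (· + 1)).modify aj 0 (· + 1)
  else sc

def unique_support_scores (marks : List Int) (W : List Int) (max_d : Int) : List (Int × Int) :=
  let scores0 : PySem.Dict Int Int := marks.foldl (fun d m => d.insert m 0) PySem.Dict.empty
  ((PySem.List.enumerate marks).foldl
      (fun sc p =>
        (PySem.List.pyRange (p.1 + 1) (marks.length : Int)).foldl
          (fun sc j => pvStepA W max_d sc p.2 (PySem.List.pyGetD marks j 0)) sc)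
      scores0).items

-- ===== PORT B =====
-- B's inner loop: per-occurrence support of mark m (cm = counts[m]) summed over the valid distances
def pvSupportB (counts : PySem.Dict Int Int) (valid : List Int) (m cm : Int) : Int :=
  valid.foldl
    (fun s d => if d = 0 then s + (cm - 1) else s + counts.getD (m + d) 0 + counts.getD (m - d) 0) 0

def unique_support_scores_alt (marks : List Int) (W : List Int) (max_d : Int) : List (Int × Int) :=
  let counts : PySem.Dict Int Int := marks.foldl (fun d m => d.insert m (d.getD m 0 + 1)) PySem.Dict.empty
  let limit : Int := min max_d ((W.length : Int) - 1)
  let valid : List Int := (PySem.List.pyRange 0 (limit + 1)).filter (fun d => PySem.List.pyGetD W d 0 == 1)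
  (counts.items.foldl
      (fun sc p => sc.insert p.1 (p.2 * pvSupportB counts valid p.1 p.2))
      PySem.Dict.empty).items

-- ===== PRECONDITION & SPEC =====
-- Pre_ excludes exactly the inputs on which Python A raises IndexError: some pair of marks at
-- distance d with d ≤ max_d but d ≥ len(W).
def Pre_unique_support_scores (marks : List Int) (W : List Int) (max_d : Int) : Prop :=
  ∀ i, i < marks.length → ∀ j, j < marks.length → i < j →
    ((marks.getD j 0 - marks.getD i 0).natAbs : Int) ≤ max_d →
    (marks.getD j 0 - marks.getD i 0).natAbs < W.length
instance (marks : List Int) (W : List Int) (max_d : Int) : Decidable (Pre_unique_support_scores marks W max_d) := by unfold Pre_unique_support_scores; infer_instance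
def pvWitness_unique_support_scores : List Int × List Int × Int := ([0, 2], ([1, 0, 1], 2))

def Spec_unique_support_scores (marks : List Int) (W : List Int) (max_d : Int) (out : List (Int × Int)) : Prop := out = unique_support_scores_alt marks W max_d
instance (marks : List Int) (W : List Int) (max_d : Int) (out : List (Int × Int)) : Decidable (Spec_unique_support_scores marks W max_d out) := by unfold Spec_unique_support_scores; infer_instance

-- ===== CLAIM (what is proved, stated in full; the proofs are below) =====
def Claim_equal_unique_support_scores : Prop := ∀ (marks : List Int) (W : List Int) (max_d : Int), Dom_unique_support_scores marks W max_d → Pre_unique_support_scores marks W max_d → Spec_unique_support_scores marks W max_d (unique_support_scores marks W max_d)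
-- ===== LEMMAS AND PROOFS =====

def pvDelta (a v : Int) : Int := if a = v then 1 else 0

def pairsFold (W : List Int) (max_d : Int) : List Int → PySem.Dict Int Int → PySem.Dict Int Int
  | [], sc => sc
  | a :: t, sc => pairsFold W max_d t (t.foldl (fun sc x => pvStepA W max_d sc a x) sc)

def pairScore (W : List Int) (max_d v : Int) : List Int → Int
  | [] => 0
  | a :: t =>
      (t.map (fun x => if pvValid W max_d ((x - a).natAbs : Int) then pvDelta a v + pvDelta x v else 0)).sum
        + pairScore W max_d v t

def pvTT (W : List Int) (max_d v : Int) (l : List Int) : Int :=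
  (l.map (fun x => if pvValid W max_d ((x - v).natAbs : Int) then (1 : Int) else 0)).sum

def pvI0 (W : List Int) (max_d : Int) : Int := if pvValid W max_d 0 then 1 else 0

lemma getD_stepA (W : List Int) (max_d : Int) (sc : PySem.Dict Int Int) (a x v : Int) :
    (pvStepA W max_d sc a x).getD v 0
      = sc.getD v 0 + (if pvValid W max_d ((x - a).natAbs : Int) then pvDelta a v + pvDelta x v else 0) := by
  unfold pvStepA
  split
  · simp only [PySem.Dict.getD_modify, pvDelta]
    split_ifs <;> subst_vars <;> omega
  · simp

lemma getD_innerFold (W : List Int) (max_d : Int) (a v : Int) :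
    ∀ (t : List Int) (sc : PySem.Dict Int Int),
      (t.foldl (fun sc x => pvStepA W max_d sc a x) sc).getD v 0
        = sc.getD v 0 + (t.map (fun x => if pvValid W max_d ((x - a).natAbs : Int) then pvDelta a v + pvDelta x v else 0)).sum := by
  intro t
  induction t with
  | nil => simp
  | cons x t ih => intro sc; simp [ih, getD_stepA]; ring

lemma keys_insert_of_mem (d : PySem.Dict Int Int) (k v : Int) (h : k ∈ d.keys) :
    (d.insert k v).keys = d.keys := by
  have hc : d.contains k = true := by
    simp only [PySem.Dict.keys, List.mem_map] at h
    obtain ⟨p, hp, hpk⟩ := h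
    simp only [PySem.Dict.contains, List.any_eq_true]
    exact ⟨p, hp, by simp [hpk]⟩
  simp only [PySem.Dict.insert, hc, if_pos, PySem.Dict.keys, List.map_map]
  refine List.map_congr_left (fun p _ => ?_)
  by_cases hpk : p.1 = k <;> simp [hpk]

lemma keys_modify_of_mem (d : PySem.Dict Int Int) (k d0 : Int) (f : Int → Int) (h : k ∈ d.keys) :
    (d.modify k d0 f).keys = d.keys := by
  rw [PySem.Dict.keys_modify]
  exact keys_insert_of_mem _ _ _ h

lemma keys_stepA (W : List Int) (max_d : Int) (sc : PySem.Dict Int Int) (a x : Int)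
    (ha : a ∈ sc.keys) (hx : x ∈ sc.keys) : (pvStepA W max_d sc a x).keys = sc.keys := by
  unfold pvStepA
  split
  · have h1 : (sc.modify a 0 (· + 1)).keys = sc.keys := keys_modify_of_mem _ _ _ _ ha
    rw [keys_modify_of_mem _ _ _ _ (h1 ▸ hx), h1]
  · rfl

lemma keys_innerFold (W : List Int) (max_d : Int) (a : Int) :
    ∀ (t : List Int) (sc : PySem.Dict Int Int), a ∈ sc.keys → (∀ y ∈ t, y ∈ sc.keys) →
      (t.foldl (fun sc x => pvStepA W max_d sc a x) sc).keys = sc.keys := by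
  intro t
  induction t with
  | nil => intro sc _ _; rfl
  | cons x t ih =>
      intro sc ha hall
      have hs : (pvStepA W max_d sc a x).keys = sc.keys :=
        keys_stepA W max_d sc a x ha (hall x (by simp))
      rw [List.foldl_cons, ih _ (hs ▸ ha) (fun y hy => hs ▸ hall y (by simp [hy])), hs]

lemma keys_pairsFold (W : List Int) (max_d : Int) :
    ∀ (l : List Int) (sc : PySem.Dict Int Int), (∀ y ∈ l, y ∈ sc.keys) →
      (pairsFold W max_d l sc).keys = sc.keys := by
  intro l
  induction l with
  | nil => intro sc _; rfl
  | cons a t ih =>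
      intro sc hall
      have hs := keys_innerFold W max_d a t sc (hall a (by simp)) (fun y hy => hall y (by simp [hy]))
      rw [pairsFold, ih _ (fun y hy => hs ▸ hall y (by simp [hy])), hs]

lemma getD_pairsFold (W : List Int) (max_d v : Int) :
    ∀ (l : List Int) (sc : PySem.Dict Int Int),
      (pairsFold W max_d l sc).getD v 0 = sc.getD v 0 + pairScore W max_d v l := by
  intro l
  induction l with
  | nil => intro sc; simp [pairsFold, pairScore]
  | cons a t ih => intro sc; rw [pairsFold, ih, getD_innerFold]; simp [pairScore]; ring

lemma getD_init (l : List Int) : ∀ (d : PySem.Dict Int Int) (v : Int), d.getD v 0 = 0 →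
    (l.foldl (fun d m => d.insert m 0) d).getD v 0 = 0 := by
  induction l with
  | nil => intro d v h; simpa using h
  | cons m l ih =>
      intro d v h
      rw [List.foldl_cons]
      apply ih
      by_cases hv : v = m
      · subst hv; simp [PySem.Dict.getD_insert_self]
      · rw [PySem.Dict.getD_insert_of_ne _ _ _ hv]; exact h

lemma keys_init (marks : List Int) :
    (marks.foldl (fun d m => d.insert m 0) (PySem.Dict.empty : PySem.Dict Int Int)).keys
      = PySem.Set.ofList marks := by
  rw [PySem.Dict.keys_foldl_insert]
  rfl

lemma outerEq (W : List Int) (max_d : Int) (marks : List Int) :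
    ∀ (n k : Nat) (sc : PySem.Dict Int Int), marks.length - k = n →
      ((PySem.List.enumerate (marks.drop k) (k : Int)).foldl
          (fun sc p =>
            (PySem.List.pyRange (p.1 + 1) (marks.length : Int)).foldl
              (fun sc j => pvStepA W max_d sc p.2 (PySem.List.pyGetD marks j 0)) sc) sc)
        = pairsFold W max_d (marks.drop k) sc := by
  intro n
  induction n with
  | zero =>
      intro k sc h
      have hk : marks.length ≤ k := by omega
      rw [List.drop_eq_nil_of_le hk]
      rfl
  | succ n ih =>
      intro k sc h
      have hk : k < marks.length := by omega
      rw [List.drop_eq_getElem_cons hk, PySem.List.enumerate_cons, List.foldl_cons]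
      have hcast : ((k : Int) + 1) = ((k + 1 : Nat) : Int) := by push_cast; ring
      have hinner :
          ((PySem.List.pyRange ((k : Int) + 1) (marks.length : Int)).foldl
            (fun sc j => pvStepA W max_d sc marks[k] (PySem.List.pyGetD marks j 0)) sc)
          = (marks.drop (k + 1)).foldl (fun sc x => pvStepA W max_d sc marks[k] x) sc := by
        rw [hcast,
          PySem.List.foldl_pyRange_pyGetD' marks 0 (fun sc x => pvStepA W max_d sc marks[k] x) sc
            (by positivity)]
        simp
      dsimp only
      rw [hinner, pairsFold, hcast, ih (k + 1) _ (by omega)]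

lemma A_char (marks W : List Int) (max_d : Int) :
    unique_support_scores marks W max_d
      = (PySem.Set.ofList marks).map (fun v => (v, pairScore W max_d v marks)) := by
  unfold unique_support_scores
  dsimp only
  have h0 := outerEq W max_d marks marks.length 0 (marks.foldl (fun d m => d.insert m 0) PySem.Dict.empty) (by omega)
  simp only [List.drop_zero, Nat.cast_zero] at h0
  rw [h0]
  have hkeys : (pairsFold W max_d marks (marks.foldl (fun d m => d.insert m 0) PySem.Dict.empty)).keys
      = PySem.Set.ofList marks := by
    rw [keys_pairsFold W max_d marks _ (fun y hy => by rw [keys_init]; exact (PySem.Set.mem_ofList _ _).2 hy),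
      keys_init]
  rw [PySem.Dict.items_eq_map_keys _ (by rw [hkeys]; exact PySem.Set.nodup_ofList marks) 0, hkeys]
  refine List.map_congr_left (fun v _ => ?_)
  rw [getD_pairsFold, getD_init marks _ _ (by rfl)]
  simp

lemma B_char (marks W : List Int) (max_d : Int) :
    unique_support_scores_alt marks W max_d
      = (PySem.Set.ofList marks).map (fun v => (v, (marks.count v : Int) *
          pvSupportB (PySem.Dict.counter marks)
            ((PySem.List.pyRange 0 (min max_d ((W.length : Int) - 1) + 1)).filter
              (fun d => PySem.List.pyGetD W d 0 == 1)) v (marks.count v : Int))) := by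
  unfold unique_support_scores_alt
  dsimp only
  rw [PySem.Dict.foldl_insert_getD_add_one_eq_counter]
  have hres : (List.foldl (fun (sc : PySem.Dict Int Int) (p : Int × Int) =>
        sc.insert p.1 (p.2 * pvSupportB (PySem.Dict.counter marks) (List.filter (fun d => PySem.List.pyGetD W d 0 == 1) (PySem.List.pyRange 0 (min max_d ((W.length : Int) - 1) + 1))) p.1 p.2))
        PySem.Dict.empty (PySem.Dict.counter marks).items).items
      = ([] : List (Int × Int)) ++ (PySem.Dict.counter marks).items.map
          (fun p => (p.1, p.2 * pvSupportB (PySem.Dict.counter marks) (List.filter (fun d => PySem.List.pyGetD W d 0 == 1) (PySem.List.pyRange 0 (min max_d ((W.length : Int) - 1) + 1))) p.1 p.2)) := by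
    refine PySem.Dict.items_foldl_insert_fresh _ _ _ _ (fun a _ => rfl) ?_
    have hkeys : ((PySem.Dict.counter marks).items.map fun (p : Int × Int) => p.1)
        = (PySem.Dict.counter marks).keys := rfl
    rw [hkeys, PySem.Dict.keys_counter]
    exact PySem.Set.nodup_ofList marks
  rw [hres, PySem.Dict.items_counter]
  simp [List.map_map, Function.comp]

lemma sum_ite_eq_count (v c : Int) : ∀ (t : List Int),
    (t.map (fun x => if x = v then c else 0)).sum = (t.count v : Int) * c := by
  intro t
  induction t with
  | nil => simp
  | cons x t ih =>
      simp only [List.map_cons, List.sum_cons, ih, List.count_cons]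
      by_cases hx : x = v
      · simp [hx]
        ring
      · simp [hx]

lemma pairScore_eq (W : List Int) (max_d v : Int) : ∀ (l : List Int),
    pairScore W max_d v l = (l.count v : Int) * (pvTT W max_d v l - pvI0 W max_d) := by
  intro l
  induction l with
  | nil => simp [pairScore, pvTT]
  | cons a t ih =>
      rw [pairScore, ih]
      by_cases hav : a = v
      · subst hav
        have hpt : (fun x => if pvValid W max_d ((x - a).natAbs : Int) then pvDelta a a + pvDelta x a else 0)
            = fun x => (if pvValid W max_d ((x - a).natAbs : Int) then (1 : Int) else 0)
                + (if x = a then pvI0 W max_d else 0) := by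
          funext x
          by_cases hx : x = a
          · subst hx; simp [pvDelta, pvI0]; split_ifs <;> norm_num
          · simp [pvDelta, hx]
        rw [hpt, PySem.List.sum_map_add_int, sum_ite_eq_count]
        have hfold : (t.map (fun x => if pvValid W max_d ((x - a).natAbs : Int) then (1 : Int) else 0)).sum
            = pvTT W max_d a t := rfl
        have hTT : pvTT W max_d a (a :: t) = pvI0 W max_d + pvTT W max_d a t := by
          simp [pvTT, pvI0]
        rw [hfold, hTT, List.count_cons_self]
        push_cast
        ring
      · have hpt : (fun x => if pvValid W max_d ((x - a).natAbs : Int) then pvDelta a v + pvDelta x v else 0)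
            = fun x => if x = v then (if pvValid W max_d (((v - a).natAbs : Nat) : Int) then (1 : Int) else 0) else 0 := by
          funext x
          by_cases hx : x = v
          · subst hx; simp [pvDelta, hav]
          · simp [pvDelta, hx, hav]
        rw [hpt, sum_ite_eq_count]
        have hTT : pvTT W max_d v (a :: t)
            = (if pvValid W max_d (((v - a).natAbs : Nat) : Int) then (1 : Int) else 0) + pvTT W max_d v t := by
          simp [pvTT]
          rw [abs_sub_comm]
        rw [hTT, List.count_cons]
        have hva : (a == v) = false := by simp [hav]
        simp only [hva, Bool.false_eq_true, if_false, Nat.add_zero]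
        push_cast
        ring

lemma mem_valid_iff (W : List Int) (max_d d : Int) :
    d ∈ (PySem.List.pyRange 0 (min max_d ((W.length : Int) - 1) + 1)).filter
          (fun d => PySem.List.pyGetD W d 0 == 1)
      ↔ (0 ≤ d ∧ pvValid W max_d d = true) := by
  simp only [List.mem_filter, PySem.List.mem_pyRange_one, pvValid, beq_iff_eq, decide_eq_true_eq]
  constructor
  · rintro ⟨⟨h0, hlt⟩, h1⟩
    exact ⟨h0, by omega, h1⟩
  · rintro ⟨h0, hle, h1⟩
    have hlen : d < (W.length : Int) := by
      by_contra hge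
      rw [not_lt] at hge
      rw [PySem.List.pyGetD_of_nonneg _ _ h0, List.getD_eq_default] at h1
      · exact absurd h1 (by norm_num)
      · omega
    exact ⟨⟨h0, by omega⟩, h1⟩

lemma nodup_valid (W : List Int) (max_d : Int) :
    ((PySem.List.pyRange 0 (min max_d ((W.length : Int) - 1) + 1)).filter
        (fun d => PySem.List.pyGetD W d 0 == 1)).Nodup :=
  (PySem.List.nodup_pyRange_one _ _).filter _

lemma sum_ind_mem (y : Int) : ∀ (D : List Int), D.Nodup →
    (D.map (fun d => if y = d then (1 : Int) else 0)).sum = if y ∈ D then (1 : Int) else 0 := by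
  intro D
  induction D with
  | nil => simp
  | cons d D ih =>
      intro hnd
      rw [List.nodup_cons] at hnd
      rw [List.map_cons, List.sum_cons, ih hnd.2]
      by_cases hy : y = d
      · subst hy
        simp [hnd.1]
      · simp [hy]

lemma countP_dist_pos (v d : Int) (hd : 0 < d) : ∀ (l : List Int),
    (l.countP (fun x => ((x - v).natAbs : Int) == d) : Int) = l.count (v + d) + l.count (v - d) := by
  intro l
  induction l with
  | nil => simp
  | cons x l ih =>
      rw [List.countP_cons, List.count_cons, List.count_cons]
      push_cast [-Int.natCast_natAbs]
      rw [ih]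
      simp only [beq_iff_eq]
      split_ifs <;> omega

lemma countP_dist_zero (v : Int) : ∀ (l : List Int),
    (l.countP (fun x => ((x - v).natAbs : Int) == 0) : Int) = l.count v := by
  intro l
  induction l with
  | nil => simp
  | cons x l ih =>
      rw [List.countP_cons, List.count_cons]
      push_cast [-Int.natCast_natAbs]
      rw [ih]
      simp only [beq_iff_eq]
      split_ifs <;> omega

lemma sum_swap (v : Int) (D : List Int) (hD : D.Nodup) : ∀ (l : List Int),
    (D.map (fun d => (l.countP (fun x => ((x - v).natAbs : Int) == d) : Int))).sum
      = (l.map (fun x => if ((x - v).natAbs : Int) ∈ D then (1 : Int) else 0)).sum := by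
  intro l
  induction l with
  | nil => simp
  | cons x l ih =>
      have hpt : (fun d => ((x :: l).countP (fun y => ((y - v).natAbs : Int) == d) : Int))
          = fun d => (l.countP (fun y => ((y - v).natAbs : Int) == d) : Int)
              + (if ((x - v).natAbs : Int) = d then 1 else 0) := by
        funext d
        rw [List.countP_cons]
        by_cases h : ((x - v).natAbs : Int) = d <;> simp [h]
      rw [hpt, PySem.List.sum_map_add_int, ih, sum_ind_mem _ D hD, List.map_cons, List.sum_cons]
      ring

lemma supportB_eq (marks W : List Int) (max_d v : Int) :
    pvSupportB (PySem.Dict.counter marks)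
        ((PySem.List.pyRange 0 (min max_d ((W.length : Int) - 1) + 1)).filter
          (fun d => PySem.List.pyGetD W d 0 == 1)) v (marks.count v : Int)
      = pvTT W max_d v marks - pvI0 W max_d := by
  set valid := (PySem.List.pyRange 0 (min max_d ((W.length : Int) - 1) + 1)).filter
      (fun d => PySem.List.pyGetD W d 0 == 1) with hvalid
  unfold pvSupportB
  have hf : (fun (s d : Int) => if d = 0 then s + ((marks.count v : Int) - 1)
        else s + (PySem.Dict.counter marks).getD (v + d) 0 + (PySem.Dict.counter marks).getD (v - d) 0)
      = fun s d => s + (if d = 0 then (marks.count v : Int) - 1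
        else (PySem.Dict.counter marks).getD (v + d) 0 + (PySem.Dict.counter marks).getD (v - d) 0) := by
    funext s d
    split <;> ring
  rw [hf, PySem.List.foldl_add, zero_add]
  have hg : ∀ d ∈ valid, (if d = 0 then (marks.count v : Int) - 1
        else (PySem.Dict.counter marks).getD (v + d) 0 + (PySem.Dict.counter marks).getD (v - d) 0)
      = (marks.countP (fun x => ((x - v).natAbs : Int) == d) : Int) + (if d = 0 then (-1 : Int) else 0) := by
    intro d hd
    have hmem := (mem_valid_iff W max_d d).1 (hvalid ▸ hd)
    by_cases h0 : d = 0
    · subst h0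
      rw [if_pos rfl, if_pos rfl, countP_dist_zero]
      ring
    · have hdpos : 0 < d := by omega
      rw [if_neg h0, if_neg h0, countP_dist_pos v d hdpos, PySem.Dict.getD_counter, PySem.Dict.getD_counter]
      ring
  rw [List.map_congr_left hg, PySem.List.sum_map_add_int]
  have hswap := sum_swap v valid (hvalid ▸ nodup_valid W max_d) marks
  rw [hswap]
  have hTT : (marks.map (fun x => if ((x - v).natAbs : Int) ∈ valid then (1 : Int) else 0)).sum
      = pvTT W max_d v marks := by
    refine congrArg _ (List.map_congr_left (fun x _ => ?_))
    by_cases h : pvValid W max_d (((x - v).natAbs : Nat) : Int) = true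
    · rw [if_pos ((mem_valid_iff W max_d _).2 ⟨Int.natCast_nonneg _, h⟩), if_pos h]
    · rw [if_neg (fun hm => h ((mem_valid_iff W max_d _).1 hm).2), if_neg h]
  rw [hTT]
  have hneg : (fun d => if d = 0 then (-1 : Int) else 0) = fun d => -(if (0 : Int) = d then (1 : Int) else 0) := by
    funext d
    by_cases h : d = 0
    · simp [h]
    · rw [if_neg h, if_neg (fun hh => h (Eq.symm hh))]
      simp
  rw [hneg]
  have hsumneg : (valid.map (fun d => -(if (0 : Int) = d then (1 : Int) else 0))).sum
      = -((valid.map (fun d => if (0 : Int) = d then (1 : Int) else 0)).sum) := by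
    induction valid with
    | nil => simp
    | cons d D ih => simp [ih]; ring
  rw [hsumneg, sum_ind_mem _ valid (hvalid ▸ nodup_valid W max_d)]
  have h0mem : ((0 : Int) ∈ valid) ↔ pvValid W max_d 0 = true := by
    rw [hvalid, mem_valid_iff]
    simp
  have hI0 : (if (0 : Int) ∈ valid then (1 : Int) else 0) = pvI0 W max_d := by
    unfold pvI0
    by_cases h : pvValid W max_d 0 = true
    · rw [if_pos (h0mem.2 h), if_pos h]
    · rw [if_neg (fun hm => h (h0mem.1 hm)), if_neg h]
  rw [hI0]
  ring

-- ===== VERDICT (by name: the statement is the Claim_ definition above) =====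
theorem unique_support_scores_spec : Claim_equal_unique_support_scores := by
  intro marks W max_d _ _
  unfold Spec_unique_support_scores
  rw [A_char, B_char]
  refine List.map_congr_left (fun v _ => ?_)
  rw [pairScore_eq, supportB_eq]
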